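-- pv_equiv track=rewrite | github.com/pypi-data/pypi-mirror-358 | packages/gcp-resource-analysis/gcp_resource_analysis-1.0.9.tar.gz/gcp_resource_analysis-1.0.9/gcp_resource_analysis/client.py | _extract_sa_name_from_key
-- ===== SOURCE A (Python) =====
-- def _extract_sa_name_from_key(key_name: str) -> str:
--     """Extract service account name from key resource name"""
--     try:
--         # Format: projects/PROJECT/serviceAccounts/SA_EMAIL/keys/KEY_ID
--         parts = key_name.split('/')
--         for i, part in enumerate(parts):
--             if part == 'serviceAccounts' and i + 1 < len(parts):
--                 email = parts[i + 1]
--                 return email.split('@')[0] if '@' in email else email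
--         return 'unknown'
--     except Exception:
--         return 'unknown'
-- ===== SOURCE B (Python) =====
-- def _extract_sa_name_from_key(key_name: str) -> str:
--     """One-pass scan of the raw string: find 'serviceAccounts/' at a segment
--     boundary and take what follows up to the next '/' or '@'; no splitting."""
--     marker = 'serviceAccounts/'
--     at_start = True
--     i = 0
--     n = len(key_name)
--     while True:
--         if at_start and key_name.startswith(marker, i):
--             j = i + len(marker)
--             out = []
--             while j < n and key_name[j] != '/' and key_name[j] != '@':
--                 out.append(key_name[j])
--                 j += 1
--             return ''.join(out)
--         if i >= n:
--             return 'unknown'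
--         at_start = key_name[i] == '/'
--         i += 1
-- ===== Notes on version B (the rewrite author's own statement) =====
-- stated objective: alternative
-- what changed: Replaced A's split('/')-and-enumerate scan over a built list of segments by a single direct scan of the raw string for the 'serviceAccounts/' marker at segment boundaries, taking what follows up to the next '/' or '@'.
import Mathlib
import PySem

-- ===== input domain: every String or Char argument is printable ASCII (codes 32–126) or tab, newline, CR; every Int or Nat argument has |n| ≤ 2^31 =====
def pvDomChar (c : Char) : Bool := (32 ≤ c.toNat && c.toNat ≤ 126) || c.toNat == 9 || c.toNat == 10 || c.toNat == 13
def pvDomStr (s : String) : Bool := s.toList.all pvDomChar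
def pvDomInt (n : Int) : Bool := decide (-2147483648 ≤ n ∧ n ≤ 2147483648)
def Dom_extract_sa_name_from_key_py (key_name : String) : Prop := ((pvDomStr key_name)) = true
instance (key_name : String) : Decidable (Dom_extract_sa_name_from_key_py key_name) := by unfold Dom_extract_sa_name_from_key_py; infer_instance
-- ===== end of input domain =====

-- B replaces A's split-and-enumerate over segments by a single direct scan of the raw
-- string for the 'serviceAccounts/' marker at segment boundaries (objective: alternative).

-- ===== PORT A =====
-- 'serviceAccounts' as a char list
def saL : List Char := "serviceAccounts".toList

-- A's for-loop over enumerate(parts): the condition 'part == "serviceAccounts" and i+1 < len(parts)'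
-- needs the current part to have a successor, hence the two-cons pattern; a final single part can
-- never fire the condition, so the loop falls through to 'unknown'.
def aScan : List (List Char) → List Char
  | [] => "unknown".toList
  | [_] => "unknown".toList
  | p :: next :: rest =>
    if p = saL then
      -- email.split('@')[0] if '@' in email else email  ([0] of a split result never raises)
      (if PySem.Chars.isIn ['@'] next then (PySem.Chars.splitOn next ['@']).headD [] else next)
    else aScan (next :: rest)

-- A's try/except never fires (split, ==, indexing a nonempty split result cannot raise), so A is total.
def extract_sa_name_from_key_py (key_name : String) : String :=
  String.ofList (aScan (PySem.Chars.splitOn key_name.toList ['/']))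

-- ===== PORT B =====
def markerL : List Char := "serviceAccounts/".toList

-- Source B's while loop, step for step: at_start flag, key_name.startswith(marker, i) test (exact:
-- isPrefixOf on the remaining characters), inner collect-chars-until-'/'-or-'@' loop (takeWhile).
def bScan : Bool → List Char → Option (List Char)
  | atStart, cs =>
    if atStart && markerL.isPrefixOf cs then
      some ((cs.drop 16).takeWhile (fun c => !(c == '/') && !(c == '@')))
    else
      match cs with
      | [] => none
      | c :: r => bScan (c == '/') r
termination_by _ cs => cs.length

def extract_sa_name_from_key_py_alt (key_name : String) : String :=
  match bScan true key_name.toList with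
  | some e => String.ofList e
  | none => "unknown"

-- ===== PRECONDITION & SPEC =====
def Spec_extract_sa_name_from_key_py (key_name : String) (out : String) : Prop := out = extract_sa_name_from_key_py_alt key_name
instance (key_name : String) (out : String) : Decidable (Spec_extract_sa_name_from_key_py key_name out) := by unfold Spec_extract_sa_name_from_key_py; infer_instance

-- ===== CLAIM (what is proved, stated in full; the proofs are below) =====
def Claim_equal_extract_sa_name_from_key_py : Prop := ∀ (key_name : String), Dom_extract_sa_name_from_key_py key_name → Spec_extract_sa_name_from_key_py key_name (extract_sa_name_from_key_py key_name)

-- ===== LEMMAS AND PROOFS =====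

-- structural model of PySem.Chars.splitOn with a one-char separator (cur = current segment, reversed)
def splitAux (c : Char) : List Char → List Char → List (List Char)
  | [], cur => [cur.reverse]
  | x :: r, cur => if x == c then cur.reverse :: splitAux c r [] else splitAux c r (x :: cur)

theorem go_eq (c : Char) : ∀ fuel cs cur acc, cs.length < fuel →
    PySem.Chars.splitOn.go [c] fuel cs cur acc = acc.reverse ++ splitAux c cs cur := by
  intro fuel
  induction fuel with
  | zero => intro cs cur acc h; omega
  | succ n ih =>
    intro cs cur acc h
    match cs with
    | [] =>
      rw [PySem.Chars.splitOn.go] <;> simp [splitAux]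
    | x :: r =>
      rw [PySem.Chars.splitOn.go]
      simp only [List.isPrefixOf, List.length_singleton, List.drop_succ_cons, List.drop_zero,
        Bool.and_true]
      by_cases hx : (x == c) = true
      · have hc : (c == x) = true := by simp only [beq_iff_eq] at hx ⊢; exact hx.symm
        simp only [hc, splitAux, hx, if_true]
        rw [ih r [] (cur.reverse :: acc) (by simp at h ⊢; omega)]
        simp
      · have hc : (c == x) = false := by
          simp only [Bool.not_eq_true, beq_eq_false_iff_ne, ne_eq] at hx
          simp only [beq_eq_false_iff_ne, ne_eq]; exact fun e => hx e.symm
        simp only [hc, splitAux, hx, Bool.false_eq_true, if_false]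
        exact ih r (x :: cur) acc (by simp at h ⊢; omega)

theorem splitOn_eq (c : Char) (cs : List Char) :
    PySem.Chars.splitOn cs [c] = splitAux c cs [] := by
  rw [PySem.Chars.splitOn, go_eq c (cs.length+1) cs [] [] (by omega)]; rfl

theorem splitAux_append (c : Char) : ∀ seg (rest cur : List Char), c ∉ seg →
    splitAux c (seg ++ c :: rest) cur = (cur.reverse ++ seg) :: splitAux c rest [] := by
  intro seg
  induction seg with
  | nil => intro rest cur _; simp [splitAux]
  | cons x s ih =>
    intro rest cur h
    have hx : (x == c) = false := by simp_all; exact fun e => h.1 e.symm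
    simp only [List.cons_append, splitAux, hx, Bool.false_eq_true, if_false]
    rw [ih rest (x :: cur) (by simp_all)]
    simp

theorem splitAux_no (c : Char) : ∀ cs (cur : List Char), c ∉ cs →
    splitAux c cs cur = [cur.reverse ++ cs] := by
  intro cs
  induction cs with
  | nil => intro cur _; simp [splitAux]
  | cons x r ih =>
    intro cur h
    have hx : (x == c) = false := by simp_all; exact fun e => h.1 e.symm
    simp only [splitAux, hx, Bool.false_eq_true, if_false]
    rw [ih (x :: cur) (by simp_all)]
    simp

theorem splitAux_headD (c : Char) : ∀ cs (cur : List Char),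
    (splitAux c cs cur).headD [] = cur.reverse ++ cs.takeWhile (fun x => !(x == c)) := by
  intro cs
  induction cs with
  | nil => intro cur; simp [splitAux]
  | cons x r ih =>
    intro cur
    by_cases hx : (x == c) = true
    · simp [splitAux, hx]
    · simp only [Bool.not_eq_true] at hx
      simp only [splitAux, hx, Bool.false_eq_true, if_false, List.takeWhile_cons, hx,
        Bool.not_false, if_true]
      simpa using ih (x :: cur)

theorem splitAux_ne_nil (c : Char) : ∀ cs (cur : List Char), splitAux c cs cur ≠ [] := by
  intro cs
  induction cs with
  | nil => intro cur; simp [splitAux]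
  | cons x r ih => intro cur; by_cases hx : (x == c) = true <;> simp [splitAux, hx, ih]

theorem marker_mem (cs : List Char) (h : markerL.isPrefixOf cs = true) : '/' ∈ cs := by
  rw [List.isPrefixOf_iff_prefix] at h
  exact h.subset (by decide)

theorem bScan_none : ∀ (cs : List Char) (b : Bool), '/' ∉ cs → bScan b cs = none := by
  intro cs
  induction cs with
  | nil =>
    intro b _; rw [bScan.eq_def]
    have : markerL.isPrefixOf ([] : List Char) = false := by decide
    simp [this]
  | cons x r ih =>
    intro b h
    rw [bScan.eq_def]
    have hp : markerL.isPrefixOf (x :: r) = false := by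
      rcases hh : markerL.isPrefixOf (x :: r) with _|_
      · rfl
      · exact absurd (marker_mem _ hh) h
    simp only [hp, Bool.and_false, Bool.false_eq_true, if_false]
    exact ih _ (fun hm => h (List.mem_cons_of_mem _ hm))

theorem bScan_false : ∀ (seg rest : List Char), '/' ∉ seg →
    bScan false (seg ++ '/' :: rest) = bScan true rest := by
  intro seg
  induction seg with
  | nil => intro rest _; rw [bScan.eq_def]; simp
  | cons x s ih =>
    intro rest h
    rw [bScan.eq_def]
    have hx : (x == '/') = false := by simp_all; exact fun e => h.1 e.symm
    simp only [Bool.false_and, Bool.false_eq_true, if_false, List.cons_append, hx]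
    exact ih rest (by simp_all)

theorem slash_decomp_unique : ∀ (seg seg' r r' : List Char), '/' ∉ seg → '/' ∉ seg' →
    seg ++ '/' :: r = seg' ++ '/' :: r' → seg = seg' ∧ r = r' := by
  intro seg
  induction seg with
  | nil =>
    intro seg' r r' _ h' e
    cases seg' with
    | nil => simpa using e
    | cons y s' => simp at e; exact absurd (e.1 ▸ List.mem_cons_self) h'
  | cons x s ih =>
    intro seg' r r' h h' e
    cases seg' with
    | nil =>
      simp at e; exact absurd (e.1 ▸ List.mem_cons_self) h
    | cons y s' =>
      simp only [List.cons_append, List.cons.injEq] at e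
      obtain ⟨rfl, e2⟩ := e
      obtain ⟨rfl, rfl⟩ := ih s' r r' (by simp_all) (by simp_all) e2
      exact ⟨rfl, rfl⟩

theorem marker_eq : markerL = saL ++ '/' :: [] := by decide

theorem bScan_skip (seg rest : List Char) (h1 : '/' ∉ seg) (h2 : seg ≠ saL) :
    bScan true (seg ++ '/' :: rest) = bScan true rest := by
  have hp : markerL.isPrefixOf (seg ++ '/' :: rest) = false := by
    rcases hh : markerL.isPrefixOf (seg ++ '/' :: rest) with _|_
    · rfl
    · exfalso
      rw [List.isPrefixOf_iff_prefix] at hh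
      obtain ⟨t, ht⟩ := hh
      rw [marker_eq] at ht
      simp only [List.append_assoc, List.cons_append, List.nil_append] at ht
      exact h2 (slash_decomp_unique seg saL rest t h1 (by decide) ht.symm).1
  rw [bScan.eq_def]
  simp only [hp, Bool.and_false, Bool.false_eq_true, if_false]
  cases seg with
  | nil => simp
  | cons x s =>
    have hx : (x == '/') = false := by simp_all; exact fun e => h1.1 e.symm
    simp only [List.cons_append, hx]
    exact bScan_false s rest (by simp_all)

-- A's two-stage cut (segment up to '/', then up to '@' if present) = B's one-stage cut
theorem atCut : ∀ (rest : List Char),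
    (if '@' ∈ rest.takeWhile (fun x => !(x == '/')) then
        (rest.takeWhile (fun x => !(x == '/'))).takeWhile (fun x => !(x == '@'))
      else rest.takeWhile (fun x => !(x == '/')))
    = rest.takeWhile (fun c => !(c == '/') && !(c == '@')) := by
  intro rest
  induction rest with
  | nil => simp
  | cons c r ih =>
    by_cases hs : c = '/'
    · subst hs; simp [List.takeWhile_cons]
    · by_cases ha : c = '@'
      · subst ha; simp [List.takeWhile_cons]
      · have h1 : (c == '/') = false := by simp [hs]
        have h2 : (c == '@') = false := by simp [ha]
        simp only [List.takeWhile_cons, h1, h2, Bool.not_false, Bool.and_self, if_true,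
          List.mem_cons]
        by_cases hm : '@' ∈ r.takeWhile (fun x => !(x == '/'))
        · simp only [hm, or_true, if_true] at ih ⊢
          simp [List.takeWhile_cons, h2, ih]
        · simp only [hm, or_false, ha, if_false] at ih ⊢
          simp only [show ¬('@' = c) from fun e => ha e.symm, false_or, hm, if_false]
          simpa [ih] using congrArg (List.cons c) ih

theorem isIn_at (q : List Char) : PySem.Chars.isIn ['@'] q = decide ('@' ∈ q) := by
  rcases h : PySem.Chars.isIn ['@'] q with _|_
  · rw [PySem.Chars.isIn_eq_false_iff] at h; simp [List.singleton_infix_iff] at h; simp [h]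
  · rw [PySem.Chars.isIn_iff_infix] at h; simp [List.singleton_infix_iff] at h; simp [h]

theorem exists_decomp : ∀ (cs : List Char), '/' ∈ cs →
    ∃ seg rest, '/' ∉ seg ∧ cs = seg ++ '/' :: rest := by
  intro cs
  induction cs with
  | nil => intro h; simp at h
  | cons x r ih =>
    intro h
    by_cases hx : x = '/'
    · exact ⟨[], r, by simp, by simp [hx]⟩
    · obtain ⟨seg, rest, h1, h2⟩ := ih (by rcases List.mem_cons.mp h with e | e; exact absurd e.symm hx; exact e)
      exact ⟨x :: seg, rest, by simp_all [eq_comm], by simp [h2]⟩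

theorem main_lemma : ∀ (n : Nat) (cs : List Char), cs.length ≤ n →
    aScan (splitAux '/' cs []) =
      (match bScan true cs with | some e => e | none => "unknown".toList) := by
  intro n
  induction n with
  | zero =>
    intro cs h
    have : cs = [] := by simpa using List.length_eq_zero_iff.mp (Nat.le_zero.mp h)
    subst this
    rw [splitAux_no '/' [] [] (by simp), bScan_none [] true (by simp)]
    rfl
  | succ n ih =>
    intro cs hlen
    by_cases hmem : '/' ∈ cs
    · obtain ⟨seg, rest, hseg, rfl⟩ := exists_decomp cs hmem
      rw [splitAux_append '/' seg rest [] hseg]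
      simp only [List.reverse_nil, List.nil_append]
      rcases hsp : splitAux '/' rest [] with _ | ⟨q, t⟩
      · exact absurd hsp (splitAux_ne_nil '/' rest [])
      by_cases hsa : seg = saL
      · subst hsa
        have hq : q = rest.takeWhile (fun x => !(x == '/')) := by
          have := splitAux_headD '/' rest []
          rw [hsp] at this; simpa using this
        have hcs : saL ++ '/' :: rest = markerL ++ rest := by rw [marker_eq]; simp
        rw [hcs, bScan.eq_def]
        have hpre : markerL.isPrefixOf (markerL ++ rest) = true := by
          rw [List.isPrefixOf_iff_prefix]; exact List.prefix_append _ _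
        have hdrop : (markerL ++ rest).drop 16 = rest := by
          have : markerL.length = 16 := by decide
          rw [← this, List.drop_left]
        simp only [hpre, Bool.and_self, if_true, hdrop]
        show aScan (saL :: q :: t) = _
        rw [aScan]
        simp only [if_pos rfl, isIn_at, splitOn_eq '@' q, splitAux_headD '@' q []]
        simp only [List.reverse_nil, List.nil_append, decide_eq_true_eq]
        rw [hq]
        exact atCut rest
      · rw [show aScan (seg :: q :: t) = aScan (q :: t) by rw [aScan]; simp [hsa]]
        rw [← hsp, bScan_skip seg rest hseg hsa]
        have : rest.length ≤ n := by simp at hlen; omega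
        exact ih rest this
    · rw [splitAux_no '/' cs [] hmem, bScan_none cs true hmem]
      rfl

-- ===== VERDICT (by name: the statement is the Claim_ definition above) =====
theorem extract_sa_name_from_key_py_spec : Claim_equal_extract_sa_name_from_key_py := by
  intro k _
  unfold Spec_extract_sa_name_from_key_py extract_sa_name_from_key_py extract_sa_name_from_key_py_alt
  rw [splitOn_eq, main_lemma k.toList.length k.toList le_rfl]
  cases bScan true k.toList <;> rfl
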